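-- pv_equiv track=rewrite | github.com/mattkistner/CS-1301 | HW09.py | lengthDict
-- ===== SOURCE A (Python) =====
-- def lengthDict(nameList):
--     if len(nameList) == 0:
--         return {}
--     else:
--         conDict = lengthDict(nameList[:-1])
--         conCount = 0
--         for letter in nameList[-1]:
--             if letter.lower() not in "aeiou":
--                 conCount += 1
--         conDict[nameList[-1]] = conCount
--         return conDict
--     pass
-- ===== SOURCE B (Python) =====
-- def lengthDict(nameList):
--     d = {}
--     for name in nameList:
--         d[name] = sum(1 for letter in name if letter.lower() not in "aeiou")
--     return d
-- ===== Notes on version B (the rewrite author's own statement) =====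
-- stated objective: faster
-- what changed: Replaces the peel-off-last recursion with list slicing by a single forward loop that counts each name's consonants with a generator-sum and assigns it into one dict, removing the O(n^2) slice copying and the recursion depth limit.
import Mathlib
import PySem

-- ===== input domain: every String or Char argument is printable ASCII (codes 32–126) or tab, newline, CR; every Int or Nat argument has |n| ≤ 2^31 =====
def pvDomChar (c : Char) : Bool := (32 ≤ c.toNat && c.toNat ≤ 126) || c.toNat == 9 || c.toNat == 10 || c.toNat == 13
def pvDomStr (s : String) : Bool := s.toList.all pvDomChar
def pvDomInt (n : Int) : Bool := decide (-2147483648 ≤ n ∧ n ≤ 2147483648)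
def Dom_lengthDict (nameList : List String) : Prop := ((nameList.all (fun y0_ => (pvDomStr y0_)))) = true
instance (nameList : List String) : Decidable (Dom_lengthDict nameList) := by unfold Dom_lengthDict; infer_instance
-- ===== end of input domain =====

-- B replaces A's peel-off-last recursion (with list slicing) by a single forward fold; objective: simpler.

-- ===== PORT A =====
-- `letter.lower() not in "aeiou"` on a 1-char string is membership of the lowered char (exact on this domain)
def pyIsCons (ch : Char) : Bool := !(PySem.Chars.lowerChar ch ∈ ['a', 'e', 'i', 'o', 'u'])

-- recursive dict builder of A; `nameList[:-1]` is the slice, `nameList[-1]` is pyGet? at -1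
-- (only evaluated when the list is nonempty, where it is `some`; the getD default is never taken)
def lengthDictA (nameList : List String) : PySem.Dict String Int :=
  if h : nameList.length = 0 then PySem.Dict.mk []
  else
    let conDict := lengthDictA (PySem.List.slice nameList none (some (-1)))
    let last := (PySem.List.pyGet? nameList (-1)).getD ""
    let conCount := last.toList.foldl (fun c letter => if pyIsCons letter then c + 1 else c) (0 : Int)
    conDict.insert last conCount
termination_by nameList.length
decreasing_by
  simp [PySem.List.slice_to_neg_one, List.length_dropLast]; omega

def lengthDict (nameList : List String) : List (String × Int) := (lengthDictA nameList).items

-- ===== PORT B =====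
def consCount (name : String) : Int :=
  ((name.toList.countP pyIsCons : Nat) : Int)

def lengthDict_alt (nameList : List String) : List (String × Int) :=
  (nameList.foldl (fun d name => d.insert name (consCount name)) (PySem.Dict.mk [])).items

-- ===== PRECONDITION & SPEC =====
def Spec_lengthDict (nameList : List String) (out : List (String × Int)) : Prop := out = lengthDict_alt nameList
instance (nameList : List String) (out : List (String × Int)) : Decidable (Spec_lengthDict nameList out) := by unfold Spec_lengthDict; infer_instance

-- ===== CLAIM (what is proved, stated in full; the proofs are below) =====
def Claim_equal_lengthDict : Prop := ∀ (nameList : List String), Dom_lengthDict nameList → Spec_lengthDict nameList (lengthDict nameList)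

-- ===== LEMMAS AND PROOFS =====

theorem count_foldl_eq_countP (cs : List Char) (c : Int) :
    cs.foldl (fun c letter => if pyIsCons letter then c + 1 else c) c
      = c + ((cs.countP pyIsCons : Nat) : Int) := by
  induction cs generalizing c with
  | nil => simp
  | cons hd tl ih =>
    simp only [List.foldl_cons, List.countP_cons, ih]
    split_ifs with h <;> simp <;> ring

theorem lengthDictA_eq_foldl (nameList : List String) :
    lengthDictA nameList
      = nameList.foldl (fun d name => d.insert name (consCount name)) (PySem.Dict.mk []) := by
  induction nameList using List.reverseRecOn with
  | nil => simp [lengthDictA]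
  | append_singleton l x ih =>
    rw [lengthDictA]
    simp only [List.length_append, List.length_singleton]
    rw [dif_neg (by omega)]
    have hslice : PySem.List.slice (l ++ [x]) none (some (-1)) = l := by
      rw [PySem.List.slice_to_neg_one]; simp
    have hlast : PySem.List.pyGet? (l ++ [x]) (-1) = some x := by
      simp [PySem.List.pyGet?, PySem.List.pyIdx?]
    rw [hslice, ih, hlast]
    simp [count_foldl_eq_countP, consCount]

-- ===== VERDICT (by name: the statement is the Claim_ definition above) =====
theorem lengthDict_spec : Claim_equal_lengthDict := by
  intro nameList _
  unfold Spec_lengthDict lengthDict lengthDict_alt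
  rw [lengthDictA_eq_foldl]
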